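-- pv_equiv track=rewrite | github.com/tkieft/adventofcode-2019 | day22/day22.py | recursive_linear
-- ===== SOURCE A (Python) =====
-- def recursive_linear(a, b, mod, num_iterations):
--     # a(ax + b) + b = a^2x + ab + b
--     if num_iterations == 1:
--         return a, b
--     elif num_iterations % 2 == 0:
--         return recursive_linear(a ** 2 % mod, (a * b + b) % mod, mod, num_iterations // 2)
--     else:
--         c,d = recursive_linear(a, b, mod, num_iterations - 1)
--         return (a * c) % mod,(a * d + b) % mod
-- ===== SOURCE B (Python) =====
-- def recursive_linear(a, b, mod, num_iterations):
--     # Iterative exponentiation-by-squaring of the affine map x -> a*x + b (mod mod).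
--     if num_iterations == 1:
--         return a, b
--     ra, rb = 1, 0            # accumulator: identity map
--     ba, bb = a % mod, b % mod  # base map
--     n = num_iterations
--     while n > 0:
--         if n % 2 == 1:
--             ra, rb = (ba * ra) % mod, (ba * rb + bb) % mod
--         ba, bb = (ba * ba) % mod, (ba * bb + bb) % mod
--         n //= 2
--     return ra, rb
-- ===== Notes on version B (the rewrite author's own statement) =====
-- stated objective: alternative
-- what changed: Replaced A's top-down recursion (halving on even counts, decrementing by one on odd counts) with an iterative bottom-up square-and-multiply loop over the bits of num_iterations that maintains an accumulator map and a repeatedly squared base map.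
import Mathlib
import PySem

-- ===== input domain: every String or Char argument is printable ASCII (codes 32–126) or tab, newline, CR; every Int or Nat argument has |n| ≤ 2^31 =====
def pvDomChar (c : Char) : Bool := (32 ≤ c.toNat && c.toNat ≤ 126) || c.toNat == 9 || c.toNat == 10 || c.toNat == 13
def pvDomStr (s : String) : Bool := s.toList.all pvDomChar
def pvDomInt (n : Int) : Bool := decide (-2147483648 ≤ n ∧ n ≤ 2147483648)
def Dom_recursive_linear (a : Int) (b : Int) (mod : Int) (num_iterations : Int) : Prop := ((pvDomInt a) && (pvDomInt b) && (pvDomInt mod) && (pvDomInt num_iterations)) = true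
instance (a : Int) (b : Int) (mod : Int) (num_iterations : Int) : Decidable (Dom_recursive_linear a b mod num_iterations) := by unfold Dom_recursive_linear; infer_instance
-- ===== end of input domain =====

-- ===== PORT A =====
-- B replaces A's top-down recursion by an iterative square-and-multiply loop over the bits
-- of num_iterations (objective: a genuinely different, iterative decomposition).
-- Port of A; the leading 'num_iterations ≤ 0' guard only makes the recursion total:
-- Python recurses forever there (RecursionError), excluded by Pre_.
def recursive_linear (a : Int) (b : Int) (mod : Int) (num_iterations : Int) : Int × Int :=
  if _h0 : num_iterations ≤ 0 then (0, 0)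
  else if _h1 : num_iterations = 1 then (a, b)
  else if _h2 : PySem.Int.mod num_iterations 2 = 0 then
    recursive_linear (PySem.Int.mod (a ^ 2) mod) (PySem.Int.mod (a * b + b) mod) mod
      (PySem.Int.floordiv num_iterations 2)
  else
    let cd := recursive_linear a b mod (num_iterations - 1)
    (PySem.Int.mod (a * cd.1) mod, PySem.Int.mod (a * cd.2 + b) mod)
termination_by num_iterations.toNat
decreasing_by
  · rw [PySem.Int.floordiv_eq_ediv_of_pos (by omega)]; omega
  · omega

-- ===== PORT B =====
-- the while-loop of Source B; state (ra, rb) accumulator, (ba, bb) base map, n the remaining bits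
def rlAltLoop (mod : Int) (ra : Int) (rb : Int) (ba : Int) (bb : Int) (n : Int) : Int × Int :=
  if _h0 : n ≤ 0 then (ra, rb)
  else
    let p := if PySem.Int.mod n 2 = 1 then
        (PySem.Int.mod (ba * ra) mod, PySem.Int.mod (ba * rb + bb) mod)
      else (ra, rb)
    rlAltLoop mod p.1 p.2 (PySem.Int.mod (ba * ba) mod) (PySem.Int.mod (ba * bb + bb) mod)
      (PySem.Int.floordiv n 2)
termination_by n.toNat
decreasing_by
  rw [PySem.Int.floordiv_eq_ediv_of_pos (by omega)]; omega

def recursive_linear_alt (a : Int) (b : Int) (mod : Int) (num_iterations : Int) : Int × Int :=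
  if num_iterations = 1 then (a, b)
  else rlAltLoop mod 1 0 (PySem.Int.mod a mod) (PySem.Int.mod b mod) num_iterations

-- ===== PRECONDITION & SPEC =====
-- Pre_ = exactly where Python A returns: num_iterations ≥ 1 (A recurses forever on ≤ 0,
-- RecursionError) and, unless num_iterations = 1 (returned before any '%'), mod ≠ 0
-- (ZeroDivisionError otherwise).
def Pre_recursive_linear (a : Int) (b : Int) (mod : Int) (num_iterations : Int) : Prop :=
  1 ≤ num_iterations ∧ (num_iterations = 1 ∨ mod ≠ 0)
instance (a : Int) (b : Int) (mod : Int) (num_iterations : Int) : Decidable (Pre_recursive_linear a b mod num_iterations) := by unfold Pre_recursive_linear; infer_instance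
def pvWitness_recursive_linear : Int × Int × Int × Int := (3, 5, 7, 10)

def Spec_recursive_linear (a : Int) (b : Int) (mod : Int) (num_iterations : Int) (out : Int × Int) : Prop := out = recursive_linear_alt a b mod num_iterations
instance (a : Int) (b : Int) (mod : Int) (num_iterations : Int) (out : Int × Int) : Decidable (Spec_recursive_linear a b mod num_iterations out) := by unfold Spec_recursive_linear; infer_instance

-- ===== CLAIM (what is proved, stated in full; the proofs are below) =====
def Claim_equal_recursive_linear : Prop := ∀ (a : Int) (b : Int) (mod : Int) (num_iterations : Int), Dom_recursive_linear a b mod num_iterations → Pre_recursive_linear a b mod num_iterations → Spec_recursive_linear a b mod num_iterations (recursive_linear a b mod num_iterations)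

-- ===== LEMMAS AND PROOFS =====

-- tail of the n-fold composition of x ↦ a*x + b:  f^n(x) = a^n * x + rlTail a b n
def rlTail (a : Int) (b : Int) : Nat → Int
  | 0 => 0
  | k + 1 => a * rlTail a b k + b

theorem rl_dvd_zero (m d : Int) (hm : m ≠ 0) (h : m ∣ d) (h2 : |d| < |m|) : d = 0 := by
  rcases h with ⟨c, rfl⟩
  rw [abs_mul] at h2
  have hm' : 0 < |m| := abs_pos.mpr hm
  have hc : |c| < 1 := by nlinarith
  rcases abs_lt.mp hc with ⟨h5, h6⟩
  have : c = 0 := by omega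
  simp [this]

-- PySem.Int.mod only depends on the argument mod m
theorem rl_mod_congr (m x y : Int) (hm : m ≠ 0) (h : m ∣ x - y) :
    PySem.Int.mod x m = PySem.Int.mod y m := by
  have hx := PySem.Int.floordiv_mul_add_mod x m
  have hy := PySem.Int.floordiv_mul_add_mod y m
  have hd : m ∣ PySem.Int.mod x m - PySem.Int.mod y m := by
    have he : PySem.Int.mod x m - PySem.Int.mod y m
        = (x - y) - (PySem.Int.floordiv x m - PySem.Int.floordiv y m) * m := by
      nlinarith [hx, hy]
    rw [he]
    exact dvd_sub h (dvd_mul_left m _)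
  have hb : |PySem.Int.mod x m - PySem.Int.mod y m| < |m| := by
    rcases lt_or_gt_of_ne hm with hneg | hpos
    · have b1 := PySem.Int.mod_neg_bounds x hneg
      have b2 := PySem.Int.mod_neg_bounds y hneg
      rw [abs_lt, abs_of_neg hneg]; omega
    · have b1 := PySem.Int.mod_nonneg x hpos
      have b2 := PySem.Int.mod_lt x hpos
      have b3 := PySem.Int.mod_nonneg y hpos
      have b4 := PySem.Int.mod_lt y hpos
      rw [abs_lt, abs_of_pos hpos]; omega
  have := rl_dvd_zero m _ hm hd hb
  omega

theorem rl_mod_sub_self (m x : Int) : m ∣ x - PySem.Int.mod x m := by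
  have hx := PySem.Int.floordiv_mul_add_mod x m
  exact ⟨PySem.Int.floordiv x m, by linarith⟩

theorem rl_mod_sub_self' (m x : Int) : m ∣ PySem.Int.mod x m - x :=
  dvd_sub_comm.mp (rl_mod_sub_self m x)

theorem rl_pow_congr (m a a' : Int) (ha : m ∣ a - a') (n : Nat) : m ∣ a ^ n - a' ^ n := by
  induction n with
  | zero => simp
  | succ k ih =>
    have : a ^ (k + 1) - a' ^ (k + 1)
        = (a - a') * a ^ k + a' * (a ^ k - a' ^ k) := by ring
    rw [this]
    exact dvd_add (ha.mul_right _) (ih.mul_left _)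

theorem rlTail_congr (m a a' b b' : Int) (ha : m ∣ a - a') (hb : m ∣ b - b') (n : Nat) :
    m ∣ rlTail a b n - rlTail a' b' n := by
  induction n with
  | zero => simp [rlTail]
  | succ k ih =>
    have : rlTail a b (k + 1) - rlTail a' b' (k + 1)
        = (a - a') * rlTail a b k + a' * (rlTail a b k - rlTail a' b' k) + (b - b') := by
      simp only [rlTail]; ring
    rw [this]
    exact dvd_add (dvd_add (ha.mul_right _) (ih.mul_left _)) hb

theorem rlTail_double (a b : Int) (k : Nat) :
    rlTail (a * a) (a * b + b) k = rlTail a b (2 * k) := by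
  induction k with
  | zero => rfl
  | succ j ih =>
    have h2 : 2 * (j + 1) = (2 * j + 1) + 1 := by ring
    rw [h2]
    simp only [rlTail, ih]
    ring

theorem rlTail_succ_pow (a b : Int) (k : Nat) :
    rlTail a b (k + 1) = a ^ k * b + rlTail a b k := by
  induction k with
  | zero => simp [rlTail]
  | succ j ih =>
    calc rlTail a b (j + 1 + 1) = a * rlTail a b (j + 1) + b := rfl
    _ = a * (a ^ j * b + rlTail a b j) + b := by rw [ih]
    _ = a ^ (j + 1) * b + (a * rlTail a b j + b) := by ring
    _ = a ^ (j + 1) * b + rlTail a b (j + 1) := rfl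

-- characterisation of A's recursion for num_iterations ≥ 2
theorem rl_specA (m : Int) (hm : m ≠ 0) :
    ∀ (k : Nat) (a b n : Int), 2 ≤ n → n.toNat = k →
      recursive_linear a b m n = (PySem.Int.mod (a ^ n.toNat) m, PySem.Int.mod (rlTail a b n.toNat) m) := by
  intro k
  induction k using Nat.strong_induction_on with
  | _ k ih =>
  intro a b n h2 hk
  have hmod2 : PySem.Int.mod n 2 = n % 2 := PySem.Int.mod_eq_emod_of_pos (by norm_num)
  have hfd : PySem.Int.floordiv n 2 = n / 2 := PySem.Int.floordiv_eq_ediv_of_pos (by norm_num)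
  rw [recursive_linear, dif_neg (by omega : ¬ n ≤ 0), dif_neg (by omega : ¬ n = 1)]
  by_cases he : n % 2 = 0
  · rw [dif_pos (by rw [hmod2]; exact he), hfd]
    by_cases hq : n / 2 = 1
    · -- n = 2
      have hn2 : n = 2 := by omega
      subst hn2
      rw [recursive_linear, dif_neg (by norm_num), dif_pos (by norm_num : (2:Int) / 2 = 1)]
      have ht : rlTail a b (2 : Int).toNat = a * b + b := by
        show rlTail a b 2 = a * b + b
        simp [rlTail]
      rw [ht]
      rfl
    · have hq2 : 2 ≤ n / 2 := by omega
      rw [ih (n / 2).toNat (by omega) _ _ _ hq2 rfl]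
      have hnt : n.toNat = 2 * (n / 2).toNat := by omega
      rw [hnt]
      set j := (n / 2).toNat with hj
      have da : m ∣ PySem.Int.mod (a ^ 2) m - a * a := by
        rw [show a * a = a ^ 2 from by ring]
        exact rl_mod_sub_self' m (a ^ 2)
      have db : m ∣ PySem.Int.mod (a * b + b) m - (a * b + b) := rl_mod_sub_self' m (a * b + b)
      simp only [Prod.mk.injEq]
      constructor
      · apply rl_mod_congr m _ _ hm
        have hp : a ^ (2 * j) = (a * a) ^ j := by rw [pow_mul]; ring_nf
        rw [hp]
        exact rl_pow_congr m _ _ da j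
      · apply rl_mod_congr m _ _ hm
        rw [← rlTail_double a b j]
        exact rlTail_congr m _ _ _ _ da db j
  · rw [dif_neg (by rw [hmod2]; exact he)]
    have h3 : 2 ≤ n - 1 := by omega
    rw [ih (n - 1).toNat (by omega) _ _ _ h3 rfl]
    have hnt : n.toNat = (n - 1).toNat + 1 := by omega
    rw [hnt]
    set j := (n - 1).toNat with hj
    have dc : m ∣ PySem.Int.mod (a ^ j) m - a ^ j := rl_mod_sub_self' m _
    have dd : m ∣ PySem.Int.mod (rlTail a b j) m - rlTail a b j := rl_mod_sub_self' m _
    simp only [Prod.mk.injEq]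
    constructor
    · apply rl_mod_congr m _ _ hm
      have heq : a * PySem.Int.mod (a ^ j) m - a ^ (j + 1)
          = a * (PySem.Int.mod (a ^ j) m - a ^ j) := by ring
      rw [heq]
      exact dc.mul_left a
    · apply rl_mod_congr m _ _ hm
      have heq : a * PySem.Int.mod (rlTail a b j) m + b - rlTail a b (j + 1)
          = a * (PySem.Int.mod (rlTail a b j) m - rlTail a b j) := by
        simp only [rlTail]; ring
      rw [heq]
      exact dd.mul_left a

-- loop invariant for B: composing acc with base^n
theorem rl_specLoop (m : Int) (hm : m ≠ 0) :
    ∀ (k : Nat) (ra rb ba bb n : Int), 1 ≤ n → n.toNat = k →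
      rlAltLoop m ra rb ba bb n
        = (PySem.Int.mod (ba ^ n.toNat * ra) m,
           PySem.Int.mod (ba ^ n.toNat * rb + rlTail ba bb n.toNat) m) := by
  intro k
  induction k using Nat.strong_induction_on with
  | _ k ih =>
  intro ra rb ba bb n h1 hk
  have hmod2 : PySem.Int.mod n 2 = n % 2 := PySem.Int.mod_eq_emod_of_pos (by norm_num)
  have hfd : PySem.Int.floordiv n 2 = n / 2 := PySem.Int.floordiv_eq_ediv_of_pos (by norm_num)
  rw [rlAltLoop, dif_neg (by omega : ¬ n ≤ 0)]
  by_cases hn1 : n = 1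
  · subst hn1
    rw [if_pos (show PySem.Int.mod 1 2 = 1 from by decide),
        show PySem.Int.floordiv (1:Int) 2 = 0 from by decide]
    rw [rlAltLoop, dif_pos (le_refl (0:Int))]
    simp [rlTail]
  · have h2 : 2 ≤ n := by omega
    have hq1 : 1 ≤ n / 2 := by omega
    rw [hfd]
    rw [ih (n / 2).toNat (by omega) _ _ _ _ _ hq1 rfl]
    set j := (n / 2).toNat with hj
    have da : m ∣ PySem.Int.mod (ba * ba) m - ba * ba := rl_mod_sub_self' m _
    have db : m ∣ PySem.Int.mod (ba * bb + bb) m - (ba * bb + bb) := rl_mod_sub_self' m _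
    have dpow : m ∣ PySem.Int.mod (ba * ba) m ^ j - ba ^ (2 * j) := by
      have hp : ba ^ (2 * j) = (ba * ba) ^ j := by rw [pow_mul]; ring_nf
      rw [hp]
      exact rl_pow_congr m _ _ da j
    have dtail : m ∣ rlTail (PySem.Int.mod (ba * ba) m) (PySem.Int.mod (ba * bb + bb) m) j
        - rlTail ba bb (2 * j) := by
      rw [← rlTail_double ba bb j]
      exact rlTail_congr m _ _ _ _ da db j
    by_cases he : n % 2 = 1
    · rw [if_pos (by rw [hmod2]; exact he)]
      have hnt : n.toNat = 2 * j + 1 := by omega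
      rw [hnt]
      have dra : m ∣ PySem.Int.mod (ba * ra) m - ba * ra := rl_mod_sub_self' m _
      have drb : m ∣ PySem.Int.mod (ba * rb + bb) m - (ba * rb + bb) := rl_mod_sub_self' m _
      simp only [Prod.mk.injEq]
      constructor
      · apply rl_mod_congr m _ _ hm
        have heq : PySem.Int.mod (ba * ba) m ^ j * PySem.Int.mod (ba * ra) m - ba ^ (2 * j + 1) * ra
            = (PySem.Int.mod (ba * ba) m ^ j - ba ^ (2 * j)) * PySem.Int.mod (ba * ra) m
              + ba ^ (2 * j) * (PySem.Int.mod (ba * ra) m - ba * ra) := by ring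
        rw [heq]
        exact dvd_add (dpow.mul_right _) (dra.mul_left _)
      · apply rl_mod_congr m _ _ hm
        have hts : rlTail ba bb (2 * j + 1) = ba ^ (2 * j) * bb + rlTail ba bb (2 * j) :=
          rlTail_succ_pow ba bb (2 * j)
        rw [hts]
        have heq : PySem.Int.mod (ba * ba) m ^ j * PySem.Int.mod (ba * rb + bb) m
              + rlTail (PySem.Int.mod (ba * ba) m) (PySem.Int.mod (ba * bb + bb) m) j
              - (ba ^ (2 * j + 1) * rb + (ba ^ (2 * j) * bb + rlTail ba bb (2 * j)))
            = (PySem.Int.mod (ba * ba) m ^ j - ba ^ (2 * j)) * PySem.Int.mod (ba * rb + bb) m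
              + ba ^ (2 * j) * (PySem.Int.mod (ba * rb + bb) m - (ba * rb + bb))
              + (rlTail (PySem.Int.mod (ba * ba) m) (PySem.Int.mod (ba * bb + bb) m) j
                 - rlTail ba bb (2 * j)) := by ring
        rw [heq]
        exact dvd_add (dvd_add (dpow.mul_right _) (drb.mul_left _)) dtail
    · rw [if_neg (by rw [hmod2]; exact he)]
      have hnt : n.toNat = 2 * j := by omega
      rw [hnt]
      simp only [Prod.mk.injEq]
      constructor
      · apply rl_mod_congr m _ _ hm
        have heq : PySem.Int.mod (ba * ba) m ^ j * ra - ba ^ (2 * j) * ra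
            = (PySem.Int.mod (ba * ba) m ^ j - ba ^ (2 * j)) * ra := by ring
        rw [heq]
        exact dpow.mul_right _
      · apply rl_mod_congr m _ _ hm
        have heq : PySem.Int.mod (ba * ba) m ^ j * rb
              + rlTail (PySem.Int.mod (ba * ba) m) (PySem.Int.mod (ba * bb + bb) m) j
              - (ba ^ (2 * j) * rb + rlTail ba bb (2 * j))
            = (PySem.Int.mod (ba * ba) m ^ j - ba ^ (2 * j)) * rb
              + (rlTail (PySem.Int.mod (ba * ba) m) (PySem.Int.mod (ba * bb + bb) m) j
                 - rlTail ba bb (2 * j)) := by ring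
        rw [heq]
        exact dvd_add (dpow.mul_right _) dtail

-- ===== VERDICT (by name: the statement is the Claim_ definition above) =====
theorem recursive_linear_spec : Claim_equal_recursive_linear := by
  intro a b m n _hDom hPre
  unfold Spec_recursive_linear
  rcases hPre with ⟨h1, h2⟩
  by_cases hn1 : n = 1
  · subst hn1
    rw [recursive_linear, recursive_linear_alt]
    simp
  · have hm : m ≠ 0 := h2.resolve_left hn1
    have hn2 : 2 ≤ n := by omega
    rw [rl_specA m hm n.toNat a b n hn2 rfl]
    rw [recursive_linear_alt, if_neg hn1]
    rw [rl_specLoop m hm n.toNat 1 0 (PySem.Int.mod a m) (PySem.Int.mod b m) n (by omega) rfl]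
    simp only [Prod.mk.injEq, mul_one, mul_zero, zero_add]
    exact ⟨rl_mod_congr m _ _ hm (rl_pow_congr m a _ (rl_mod_sub_self m a) n.toNat),
           rl_mod_congr m _ _ hm
             (rlTail_congr m a _ b _ (rl_mod_sub_self m a) (rl_mod_sub_self m b) n.toNat)⟩
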